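-- pv_equiv track=rewrite | github.com/MrBrantCode/unitest_baseline | mut_generate/mist_train_cf/cf_34894/solution.py | final_fibonacci_number
-- ===== SOURCE A (Python) =====
-- def final_fibonacci_number(surname):
--     def fibonacci(n):
--         if n <= 0:
--             return 0
--         elif n == 1:
--             return 1
--         else:
--             a, b = 0, 1
--             for _ in range(2, n + 1):
--                 a, b = b, a + b
--             return b
--
--     first_letter_position = ord(surname[0].lower()) - 96
--     last_letter_position = ord(surname[-1].lower()) - 96
--     first_fibonacci = fibonacci(first_letter_position)
--     last_fibonacci = fibonacci(last_letter_position)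
--     final_fibonacci = first_fibonacci + last_fibonacci
--     return final_fibonacci
-- ===== SOURCE B (Python) =====
-- def final_fibonacci_number(surname):
--     def fib_pair(n):
--         # returns (F(n), F(n+1)) for n >= 0
--         if n == 0:
--             return (0, 1)
--         a, b = fib_pair(n - 1)
--         return (b, a + b)
--
--     s = surname.lower()
--     total = 0
--     for ch in (s[0], s[-1]):
--         p = ord(ch) - 96
--         total += fib_pair(p)[0] if p > 0 else 0
--     return total
-- ===== Notes on version B (the rewrite author's own statement) =====
-- stated objective: alternative
-- what changed: B lowercases the whole string once and folds over the pair (first char, last char) with a running total, computing Fibonacci by a recursive pair function fib_pair(n)=(F(n),F(n+1)) instead of A's per-letter iterative two-accumulator range loop with separate named intermediates.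
import Mathlib
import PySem

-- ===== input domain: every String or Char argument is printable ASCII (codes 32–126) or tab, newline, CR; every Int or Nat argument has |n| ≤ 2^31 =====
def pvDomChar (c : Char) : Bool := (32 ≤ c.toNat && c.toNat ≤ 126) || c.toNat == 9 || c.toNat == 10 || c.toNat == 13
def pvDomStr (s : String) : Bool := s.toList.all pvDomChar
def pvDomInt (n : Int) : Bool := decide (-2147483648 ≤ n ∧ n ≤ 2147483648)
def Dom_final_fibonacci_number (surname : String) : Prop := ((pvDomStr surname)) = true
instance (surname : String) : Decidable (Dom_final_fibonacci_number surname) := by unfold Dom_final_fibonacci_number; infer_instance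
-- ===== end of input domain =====

-- B lowercases the string once and folds a running total over (first, last), with Fibonacci as a recursive pair function (alternative decomposition, not faster).


-- ===== PORT A =====
-- A's inner fibonacci: iterative bottom-up loop 'for _ in range(2, n+1): a, b = b, a+b'
def fibIterA (n : Int) : Int :=
  if n ≤ 0 then 0
  else if n = 1 then 1
  else ((PySem.List.pyRange 2 (n + 1) 1).foldl
          (fun (ab : Int × Int) _ => (ab.2, ab.1 + ab.2)) (0, 1)).2

-- surname[0] / surname[-1] need surname ≠ "" (IndexError otherwise; excluded by Pre_)
def final_fibonacci_number (surname : String) : Int :=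
  let cs := surname.toList
  let first_letter_position : Int :=
    ((PySem.Chars.lowerChar (PySem.List.pyGetD cs 0 'a')).toNat : Int) - 96
  let last_letter_position : Int :=
    ((PySem.Chars.lowerChar (PySem.List.pyGetD cs (-1) 'a')).toNat : Int) - 96
  let first_fibonacci := fibIterA first_letter_position
  let last_fibonacci := fibIterA last_letter_position
  let final_fibonacci := first_fibonacci + last_fibonacci
  final_fibonacci

-- ===== PORT B =====
-- B's fib_pair: recursive, returns (F n, F (n+1))
def fibPairB : Nat → Int × Int
  | 0 => (0, 1)
  | Nat.succ k =>
      let ab := fibPairB k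
      (ab.2, ab.1 + ab.2)

def final_fibonacci_number_alt (surname : String) : Int :=
  let s := (PySem.Str.lower surname).toList
  [PySem.List.pyGetD s 0 'a', PySem.List.pyGetD s (-1) 'a'].foldl
    (fun total ch =>
      let p : Int := (ch.toNat : Int) - 96
      total + (if 0 < p then (fibPairB p.toNat).1 else 0)) 0

-- ===== PRECONDITION & SPEC =====
-- Pre_ excludes only the empty string, on which both Pythons raise IndexError at surname[0] / s[0].
def Pre_final_fibonacci_number (surname : String) : Prop := surname ≠ ""
instance (surname : String) : Decidable (Pre_final_fibonacci_number surname) := by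
  unfold Pre_final_fibonacci_number; infer_instance

def pvWitness_final_fibonacci_number : String := "Smith"

def Spec_final_fibonacci_number (surname : String) (out : Int) : Prop := out = final_fibonacci_number_alt surname
instance (surname : String) (out : Int) : Decidable (Spec_final_fibonacci_number surname out) := by unfold Spec_final_fibonacci_number; infer_instance

-- ===== CLAIM (what is proved, stated in full; the proofs are below) =====
def Claim_equal_final_fibonacci_number : Prop := ∀ (surname : String), Dom_final_fibonacci_number surname → Pre_final_fibonacci_number surname → Spec_final_fibonacci_number surname (final_fibonacci_number surname)

-- ===== LEMMAS AND PROOFS =====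

-- A's loop over range(2, m+3) computes exactly B's Fibonacci pair at m+1
theorem foldl_eq_fibPairB (m : Nat) :
    (PySem.List.pyRange 2 ((m : Int) + 3) 1).foldl
      (fun (ab : Int × Int) _ => (ab.2, ab.1 + ab.2)) (0, 1)
    = fibPairB (m + 1) := by
  induction m with
  | zero =>
      rw [show ((0 : Nat) : Int) + 3 = 2 + 1 by norm_num,
          PySem.List.pyRange_one_singleton]
      simp [fibPairB]
  | succ k ih =>
      have h : (((k : Nat) + 1 : Nat) : Int) + 3 = ((k : Int) + 3) + 1 := by push_cast; ring
      rw [h, PySem.List.pyRange_one_succ_right (by omega), List.foldl_append, ih]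
      simp [fibPairB]

-- A's per-position fibonacci equals B's
theorem fibIterA_eq (n : Int) :
    fibIterA n = (if 0 < n then (fibPairB n.toNat).1 else 0) := by
  by_cases h0 : n ≤ 0
  · rw [fibIterA]; simp [h0, show ¬ 0 < n by omega]
  · by_cases h1 : n = 1
    · subst h1; rw [fibIterA]; simp [fibPairB]
    · have h2 : 2 ≤ n := by omega
      obtain ⟨m, hm⟩ : ∃ m : Nat, n = (m : Int) + 2 := ⟨(n - 2).toNat, by omega⟩
      rw [fibIterA]
      simp only [if_neg h0, if_neg h1]
      have : n + 1 = (m : Int) + 3 := by omega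
      rw [this, foldl_eq_fibPairB]
      have ht : n.toNat = m + 2 := by omega
      rw [if_pos (by omega), ht]
      simp [fibPairB]

-- ===== VERDICT (by name: the statement is the Claim_ definition above) =====
theorem final_fibonacci_number_spec : Claim_equal_final_fibonacci_number := by
  intro surname _ _
  unfold Spec_final_fibonacci_number final_fibonacci_number final_fibonacci_number_alt
  simp only [PySem.Str.toList_lower, List.foldl_cons, List.foldl_nil,
    fibIterA_eq, PySem.Chars.lower]
  rw [show ('a' : Char) = PySem.Chars.lowerChar 'a' from by decide,
      PySem.List.pyGetD_map, PySem.List.pyGetD_map]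
  simp only [show PySem.Chars.lowerChar 'a' = 'a' from by decide, zero_add]
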